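-- pv_equiv track=rewrite | github.com/uprez-net/uprez-valuation | src/backend/ml_services/models/risk_assessment.py | _is_shock_relevant
-- ===== SOURCE A (Python) =====
-- def _is_shock_relevant(risk_name: str, shock_type: str) -> bool:
--     """Determine if a shock is relevant to a risk factor"""
--
--     relevance_map = {
--         'market_beta_shock': ['systematic_risk', 'volatility_risk'],
--         'volatility_shock': ['volatility_risk', 'market_risk'],
--         'liquidity_shock': ['liquidity_risk', 'financial_liquidity'],
--         'revenue_shock': ['revenue_concentration', 'earnings_volatility'],
--         'margin_shock': ['operating_leverage', 'earnings_volatility'],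
--         'credit_shock': ['leverage_risk', 'interest_coverage_risk'],
--         'industry_shock': ['industry_' in risk_name],
--         'regulatory_shock': ['regulatory' in risk_name, 'compliance_risk'],
--         'reputation_shock': ['social_risk', 'governance_risk'],
--         'operational_shock': ['operational' in risk_name],
--         'management_shock': ['management_risk', 'governance_risk'],
--         'technology_shock': ['technology_risk', 'cybersecurity_risk']
--     }
--
--     if shock_type in relevance_map:
--         relevant_patterns = relevance_map[shock_type]
--         return any(
--             pattern in risk_name if isinstance(pattern, str) else pattern
--             for pattern in relevant_patterns
--         )
--
--     return False
-- ===== SOURCE B (Python) =====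
-- # Inverted index: one flat pattern-major table pattern -> shock types; a single
-- # any() over patterns, instead of a per-call dict keyed by shock type.
-- _PATTERN_SHOCKS = (
--     ('systematic_risk', ('market_beta_shock',)),
--     ('volatility_risk', ('market_beta_shock', 'volatility_shock')),
--     ('market_risk', ('volatility_shock',)),
--     ('liquidity_risk', ('liquidity_shock',)),
--     ('financial_liquidity', ('liquidity_shock',)),
--     ('revenue_concentration', ('revenue_shock',)),
--     ('earnings_volatility', ('revenue_shock', 'margin_shock')),
--     ('operating_leverage', ('margin_shock',)),
--     ('leverage_risk', ('credit_shock',)),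
--     ('interest_coverage_risk', ('credit_shock',)),
--     ('industry_', ('industry_shock',)),
--     ('regulatory', ('regulatory_shock',)),
--     ('compliance_risk', ('regulatory_shock',)),
--     ('social_risk', ('reputation_shock',)),
--     ('governance_risk', ('reputation_shock', 'management_shock')),
--     ('operational', ('operational_shock',)),
--     ('management_risk', ('management_shock',)),
--     ('technology_risk', ('technology_shock',)),
--     ('cybersecurity_risk', ('technology_shock',)),
-- )
--
-- def _is_shock_relevant(risk_name: str, shock_type: str) -> bool:
--     """Determine if a shock is relevant to a risk factor (inverted pattern index)."""
--     return any(shock_type in shocks and pattern in risk_name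
--                for pattern, shocks in _PATTERN_SHOCKS)
-- ===== Notes on version B (the rewrite author's own statement) =====
-- stated objective: alternative
-- what changed: Inverted the relation: B keeps one static pattern-major index (substring pattern -> shock types that it makes relevant) and answers with a single any() scan over patterns, instead of A's per-call dict keyed by shock type whose mixed string/bool value list is then scanned.
import Mathlib
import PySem

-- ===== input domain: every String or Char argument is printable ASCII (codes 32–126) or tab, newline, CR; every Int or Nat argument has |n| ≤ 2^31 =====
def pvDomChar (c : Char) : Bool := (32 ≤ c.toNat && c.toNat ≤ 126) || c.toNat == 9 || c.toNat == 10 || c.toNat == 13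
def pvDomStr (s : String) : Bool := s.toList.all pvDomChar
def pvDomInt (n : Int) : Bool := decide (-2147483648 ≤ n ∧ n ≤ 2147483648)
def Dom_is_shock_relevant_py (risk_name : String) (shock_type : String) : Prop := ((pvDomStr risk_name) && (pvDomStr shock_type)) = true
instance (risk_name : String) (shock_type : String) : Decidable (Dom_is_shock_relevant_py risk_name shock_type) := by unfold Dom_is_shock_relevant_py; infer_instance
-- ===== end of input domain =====

-- B inverts A's relation into one static pattern-major index (pattern -> shock types) scanned with a single any, instead of A's per-call shock-keyed dict + pattern scan (objective: alternative).


-- ===== PORT A =====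
-- patterns in the dict values are either a literal string (substring test on risk_name) or an already-evaluated bool
inductive PvPat where
  | s : String → PvPat
  | b : Bool → PvPat
deriving DecidableEq, Repr

def is_shock_relevant_py (risk_name : String) (shock_type : String) : Bool :=
  let relevance_map : PySem.Dict String (List PvPat) := PySem.Dict.mk [
    ("market_beta_shock", [PvPat.s "systematic_risk", PvPat.s "volatility_risk"]),
    ("volatility_shock", [PvPat.s "volatility_risk", PvPat.s "market_risk"]),
    ("liquidity_shock", [PvPat.s "liquidity_risk", PvPat.s "financial_liquidity"]),
    ("revenue_shock", [PvPat.s "revenue_concentration", PvPat.s "earnings_volatility"]),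
    ("margin_shock", [PvPat.s "operating_leverage", PvPat.s "earnings_volatility"]),
    ("credit_shock", [PvPat.s "leverage_risk", PvPat.s "interest_coverage_risk"]),
    ("industry_shock", [PvPat.b (PySem.Str.isIn "industry_" risk_name)]),
    ("regulatory_shock", [PvPat.b (PySem.Str.isIn "regulatory" risk_name), PvPat.s "compliance_risk"]),
    ("reputation_shock", [PvPat.s "social_risk", PvPat.s "governance_risk"]),
    ("operational_shock", [PvPat.b (PySem.Str.isIn "operational" risk_name)]),
    ("management_shock", [PvPat.s "management_risk", PvPat.s "governance_risk"]),
    ("technology_shock", [PvPat.s "technology_risk", PvPat.s "cybersecurity_risk"])]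
  if relevance_map.contains shock_type then
    let relevant_patterns := relevance_map.getD shock_type []
    relevant_patterns.any (fun p => match p with
      | PvPat.s pat => PySem.Str.isIn pat risk_name
      | PvPat.b bv => bv)
  else
    false

-- ===== PORT B =====
-- B: static inverted index pattern -> shock types, scanned pattern-major with one any
def pvPatternShocks : List (String × List String) := [
  ("systematic_risk", ["market_beta_shock"]),
  ("volatility_risk", ["market_beta_shock", "volatility_shock"]),
  ("market_risk", ["volatility_shock"]),
  ("liquidity_risk", ["liquidity_shock"]),
  ("financial_liquidity", ["liquidity_shock"]),
  ("revenue_concentration", ["revenue_shock"]),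
  ("earnings_volatility", ["revenue_shock", "margin_shock"]),
  ("operating_leverage", ["margin_shock"]),
  ("leverage_risk", ["credit_shock"]),
  ("interest_coverage_risk", ["credit_shock"]),
  ("industry_", ["industry_shock"]),
  ("regulatory", ["regulatory_shock"]),
  ("compliance_risk", ["regulatory_shock"]),
  ("social_risk", ["reputation_shock"]),
  ("governance_risk", ["reputation_shock", "management_shock"]),
  ("operational", ["operational_shock"]),
  ("management_risk", ["management_shock"]),
  ("technology_risk", ["technology_shock"]),
  ("cybersecurity_risk", ["technology_shock"])]

def is_shock_relevant_py_alt (risk_name : String) (shock_type : String) : Bool :=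
  pvPatternShocks.any (fun ps => ps.2.contains shock_type && PySem.Str.isIn ps.1 risk_name)

-- ===== PRECONDITION & SPEC =====
def Spec_is_shock_relevant_py (risk_name : String) (shock_type : String) (out : Bool) : Prop := out = is_shock_relevant_py_alt risk_name shock_type
instance (risk_name : String) (shock_type : String) (out : Bool) : Decidable (Spec_is_shock_relevant_py risk_name shock_type out) := by unfold Spec_is_shock_relevant_py; infer_instance

-- ===== CLAIM =====
def Claim_equal_is_shock_relevant_py : Prop := ∀ (risk_name : String) (shock_type : String), Dom_is_shock_relevant_py risk_name shock_type → Spec_is_shock_relevant_py risk_name shock_type (is_shock_relevant_py risk_name shock_type)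

-- ===== LEMMAS AND PROOFS =====

-- ===== VERDICT =====
theorem is_shock_relevant_py_spec : Claim_equal_is_shock_relevant_py := by
  intro risk_name shock_type _
  unfold Spec_is_shock_relevant_py is_shock_relevant_py is_shock_relevant_py_alt pvPatternShocks
  by_cases h0 : shock_type = "market_beta_shock"
  case pos => subst h0; simp [PySem.Dict.getD_eq_get?_getD, PySem.Dict.get?_mk_cons]
  all_goals by_cases h1 : shock_type = "volatility_shock"
  case pos => subst h1; simp [PySem.Dict.getD_eq_get?_getD, PySem.Dict.get?_mk_cons]
  all_goals by_cases h2 : shock_type = "liquidity_shock"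
  case pos => subst h2; simp [PySem.Dict.getD_eq_get?_getD, PySem.Dict.get?_mk_cons]
  all_goals by_cases h3 : shock_type = "revenue_shock"
  case pos => subst h3; simp [PySem.Dict.getD_eq_get?_getD, PySem.Dict.get?_mk_cons]
  all_goals by_cases h4 : shock_type = "margin_shock"
  case pos => subst h4; simp [PySem.Dict.getD_eq_get?_getD, PySem.Dict.get?_mk_cons]; exact Bool.or_comm _ _
  all_goals by_cases h5 : shock_type = "credit_shock"
  case pos => subst h5; simp [PySem.Dict.getD_eq_get?_getD, PySem.Dict.get?_mk_cons]
  all_goals by_cases h6 : shock_type = "industry_shock"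
  case pos => subst h6; simp [PySem.Dict.getD_eq_get?_getD, PySem.Dict.get?_mk_cons]
  all_goals by_cases h7 : shock_type = "regulatory_shock"
  case pos => subst h7; simp [PySem.Dict.getD_eq_get?_getD, PySem.Dict.get?_mk_cons]
  all_goals by_cases h8 : shock_type = "reputation_shock"
  case pos => subst h8; simp [PySem.Dict.getD_eq_get?_getD, PySem.Dict.get?_mk_cons]
  all_goals by_cases h9 : shock_type = "operational_shock"
  case pos => subst h9; simp [PySem.Dict.getD_eq_get?_getD, PySem.Dict.get?_mk_cons]
  all_goals by_cases h10 : shock_type = "management_shock"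
  case pos => subst h10; simp [PySem.Dict.getD_eq_get?_getD, PySem.Dict.get?_mk_cons]; exact Bool.or_comm _ _
  all_goals by_cases h11 : shock_type = "technology_shock"
  case pos => subst h11; simp [PySem.Dict.getD_eq_get?_getD, PySem.Dict.get?_mk_cons]
  simp [PySem.Dict.getD_eq_get?_getD, PySem.Dict.get?_mk_cons, h0, h1, h2, h3, h4, h5,
        h6, h7, h8, h9, h10, h11]
  intro hor
  rcases hor with h|h|h|h|h|h|h|h|h|h|h|h <;> exact absurd h.symm (by assumption)
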